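-- pv_equiv track=rewrite | github.com/rbrn1999/leetcode-sol | problems/2511. Maximum Enemy Forts That Can Be Captured.py | captureForts
-- ===== SOURCE A (Python) =====
-- from typing import List
--
-- def captureForts(forts: List[int]) -> int:
--     n = len(forts)
--     state = 0
--     i = 0
--     result = 0
--     for j in range(n):
--         if forts[j] == 1:
--             if state == -1:
--                 result = max(result, j - i - 1)
--             i = j
--             state = 1
--         elif forts[j] == -1:
--             if state == 1:
--                 result = max(result, j - i - 1)
--             i = j
--             state = -1
--
--     return result
-- ===== SOURCE B (Python) =====
-- from typing import List
--
-- def captureForts(forts: List[int]) -> int: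
--     # Run-length encode the array into (cls, length) runs, cls in {1, -1, 0}
--     # (anything that is not a fort counts as 0). A zero-run flanked by two
--     # opposite fort runs is a capturable stretch of that run's length.
--     runs = []
--     for v in forts:
--         c = v if v == 1 or v == -1 else 0
--         if runs and runs[-1][0] == c:
--             runs[-1] = (c, runs[-1][1] + 1)
--         else:
--             runs.append((c, 1))
--     result = 0
--     for (a, _), (_, blen), (c, _) in zip(runs, runs[1:], runs[2:]):
--         if a * c == -1:
--             result = max(result, blen)
--     return result
-- ===== Notes on version B (the rewrite author's own statement) =====
-- stated objective: alternative
-- what changed: Replaces A's index-tracking state machine (last-fort index i and sign state updated per element) by a run-length encoding of the array into (class, length) runs followed by a scan over triples of consecutive runs, taking a middle run's length whenever the flanking runs are opposite forts.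
import Mathlib
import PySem

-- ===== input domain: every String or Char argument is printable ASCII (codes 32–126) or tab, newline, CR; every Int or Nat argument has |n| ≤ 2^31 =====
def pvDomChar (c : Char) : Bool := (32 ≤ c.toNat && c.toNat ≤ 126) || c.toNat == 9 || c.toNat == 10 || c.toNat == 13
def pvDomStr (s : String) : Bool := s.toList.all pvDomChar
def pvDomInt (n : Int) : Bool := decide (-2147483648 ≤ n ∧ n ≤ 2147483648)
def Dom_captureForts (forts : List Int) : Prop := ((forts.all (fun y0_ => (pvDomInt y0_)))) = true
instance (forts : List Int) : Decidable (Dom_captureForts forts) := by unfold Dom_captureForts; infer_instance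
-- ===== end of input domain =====

-- B replaces A's index-tracking state machine by a run-length encoding of the array
-- into (class, length) runs followed by a scan over triples of consecutive runs
-- (objective: alternative algorithm/data structure, same O(n) cost).

-- ===== PORT A =====
-- loop body of A: state triple (state, i, result), one step per (j, forts[j])
def stepA (st : Int × Int × Int) (jv : Int × Int) : Int × Int × Int :=
  if jv.2 = 1 then
    (1, jv.1, if st.1 = -1 then max st.2.2 (jv.1 - st.2.1 - 1) else st.2.2)
  else if jv.2 = -1 then
    (-1, jv.1, if st.1 = 1 then max st.2.2 (jv.1 - st.2.1 - 1) else st.2.2)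
  else st

-- A: for j in range(n) over forts[j] with running (state, i, result); return result
def captureForts (forts : List Int) : Int :=
  ((PySem.List.enumerate forts 0).foldl stepA (0, 0, 0)).2.2

-- ===== PORT B =====
-- loop body of B's first pass: extend the run list by one element
-- (runs[-1] update / append, as in Source B: getLast? = runs[-1], dropLast ++ [..] = in-place update)
def addRun (runs : List (Int × Int)) (v : Int) : List (Int × Int) :=
  let c : Int := if v = 1 ∨ v = -1 then v else 0
  match runs.getLast? with
  | some (c', len) => if c' = c then runs.dropLast ++ [(c', len + 1)] else runs ++ [(c, 1)]
  | none => [(c, 1)]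

-- loop body of B's second pass: one triple of consecutive runs ((a,_),(_,blen),(c,_))
def stepB (r : Int) (t : (Int × Int) × (Int × Int) × (Int × Int)) : Int :=
  if t.1.1 * t.2.2.1 = -1 then max r t.2.1.2 else r

-- B: run-length encode, then scan zip(runs, runs[1:], runs[2:])
def captureForts_alt (forts : List Int) : Int :=
  let runs := forts.foldl addRun []
  (runs.zip ((runs.drop 1).zip (runs.drop 2))).foldl stepB 0

-- ===== PRECONDITION & SPEC =====
def Spec_captureForts (forts : List Int) (out : Int) : Prop := out = captureForts_alt forts
instance (forts : List Int) (out : Int) : Decidable (Spec_captureForts forts out) := by unfold Spec_captureForts; infer_instance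

-- ===== CLAIM (what is proved, stated in full; the proofs are below) =====
def Claim_equal_captureForts : Prop := ∀ (forts : List Int), Dom_captureForts forts → Spec_captureForts forts (captureForts forts)

-- ===== LEMMAS AND PROOFS =====

-- reference recursion: A's loop with the gap (j - i - 1) carried explicitly
def go (st gap res : Int) : List Int → Int
  | [] => res
  | v :: t =>
    if v = 1 then go 1 0 (if st = -1 then max res gap else res) t
    else if v = -1 then go (-1) 0 (if st = 1 then max res gap else res) t
    else go st (gap + 1) res t

theorem foldA_eq_go (l : List Int) : ∀ (j0 st i res : Int),
    ((PySem.List.enumerate l j0).foldl stepA (st, i, res)).2.2 = go st (j0 - i - 1) res l := by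
  induction l with
  | nil => intro j0 st i res; simp [PySem.List.enumerate_nil, go]
  | cons v t ih =>
    intro j0 st i res
    rw [PySem.List.enumerate_cons]
    by_cases h1 : v = 1
    · subst h1
      simp only [List.foldl_cons, stepA, go]
      rw [ih]
      norm_num
    · by_cases h2 : v = -1
      · subst h2
        simp only [List.foldl_cons, stepA, go]
        norm_num
        rw [ih]
        norm_num
      · simp only [List.foldl_cons, stepA, go, if_neg h1, if_neg h2]
        rw [ih]
        congr 1
        omega

-- with state 0 the gap is never consulted
theorem go_zero_gap (l : List Int) : ∀ (g g' res : Int), go 0 g res l = go 0 g' res l := by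
  induction l with
  | nil => intro g g' res; rfl
  | cons v t ih =>
    intro g g' res
    by_cases h1 : v = 1
    · subst h1; simp [go]
    · by_cases h2 : v = -1
      · subst h2; simp [go]
      · simp only [go, if_neg h1, if_neg h2]; exact ih _ _ _

-- contributions of B's triple scan, listed left to right
def contribs : List (Int × Int) → List Int
  | a :: b :: c :: t => (if a.1 * c.1 = -1 then [b.2] else []) ++ contribs (b :: c :: t)
  | _ => []

-- contribution of the final triple created by appending x
def tailC : List (Int × Int) → (Int × Int) → List Int
  | [a, b], x => if a.1 * x.1 = -1 then [b.2] else []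
  | _ :: b :: c :: t, x => tailC (b :: c :: t) x
  | _, _ => []

theorem foldB_eq_contribs : ∀ (L : List (Int × Int)) (r : Int),
    (L.zip ((L.drop 1).zip (L.drop 2))).foldl stepB r = (contribs L).foldl max r := by
  intro L
  induction L with
  | nil => intro r; rfl
  | cons a t ih =>
    intro r
    match t with
    | [] => rfl
    | [b] => rfl
    | b :: c :: s =>
      simp only [List.drop, List.zip_cons_cons, List.foldl_cons, contribs]
      by_cases h : a.1 * c.1 = -1
      · simp only [stepB, h, List.foldl_append]
        exact ih (max r b.2)
      · simp only [stepB, if_neg h, List.nil_append]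
        exact ih r

theorem tailC_fst (x y : Int × Int) (hxy : x.1 = y.1) :
    ∀ (L : List (Int × Int)), tailC L x = tailC L y := by
  intro L
  induction L with
  | nil => rfl
  | cons a t ih =>
    match t with
    | [] => rfl
    | [b] => simp only [tailC, hxy]
    | b :: c :: s => simpa only [tailC] using ih

theorem contribs_concat : ∀ (L : List (Int × Int)) (x : Int × Int),
    contribs (L ++ [x]) = contribs L ++ tailC L x := by
  intro L
  induction L with
  | nil => intro x; rfl
  | cons a t ih =>
    intro x
    match t with
    | [] => rfl
    | [b] =>
      simp only [List.cons_append, contribs, tailC, List.nil_append]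
      split <;> rfl
    | b :: c :: s =>
      have h3 : (a :: b :: c :: s) ++ [x] = a :: b :: c :: (s ++ [x]) := by simp
      rw [h3]
      show (if a.1 * c.1 = -1 then [b.2] else []) ++ contribs (b :: c :: (s ++ [x]))
          = ((if a.1 * c.1 = -1 then [b.2] else []) ++ contribs (b :: c :: s)) ++ tailC (a :: b :: c :: s) x
      rw [show b :: c :: (s ++ [x]) = (b :: c :: s) ++ [x] by simp, ih x]
      simp [tailC, List.append_assoc]

theorem tailC_concat : ∀ (L : List (Int × Int)) (y x : Int × Int),
    tailC (L ++ [y]) x =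
      (match L.getLast? with
       | none => []
       | some p => if p.1 * x.1 = -1 then [y.2] else []) := by
  intro L
  induction L with
  | nil => intro y x; rfl
  | cons a t ih =>
    intro y x
    match t with
    | [] => rfl
    | b :: s =>
      have h3 : (a :: b :: s) ++ [y] = a :: ((b :: s) ++ [y]) := by simp
      rw [h3]
      have hgl : (a :: b :: s).getLast? = (b :: s).getLast? := by
        simp [List.getLast?_cons_cons]
      rw [hgl, ← ih y x]
      match s with
      | [] => rfl
      | c :: u => rfl

-- the scan value is nonnegative
theorem foldl_max_nonneg (l : List Int) : ∀ r : Int, 0 ≤ r → 0 ≤ l.foldl max r := by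
  induction l with
  | nil => intro r hr; exact hr
  | cons a t ih => intro r hr; exact ih _ (le_trans hr (le_max_left _ _))

-- abbreviations for the state A's loop would be in after the runs R
def stClassOf (R : List (Int × Int)) : Int :=
  match R.getLast? with
  | none => 0
  | some (c, _) =>
    if c = 0 then (match R.dropLast.getLast? with | none => 0 | some (c2, _) => c2) else c

def gapOf (R : List (Int × Int)) : Int :=
  match R.getLast? with
  | none => 0
  | some (c, len) => if c = 0 then len else 0

def scanVal (R : List (Int × Int)) : Int := (contribs R).foldl max 0

-- adjacent runs have distinct classes
def Alt : List (Int × Int) → Prop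
  | a :: b :: t => a.1 ≠ b.1 ∧ Alt (b :: t)
  | _ => True

-- all run classes are fort classes
def ClsOK (R : List (Int × Int)) : Prop := ∀ p ∈ R, p.1 = 1 ∨ p.1 = -1 ∨ p.1 = 0

theorem alt_concat : ∀ (L : List (Int × Int)) (x : Int × Int),
    Alt (L ++ [x]) ↔ Alt L ∧ (∀ p ∈ L.getLast?, p.1 ≠ x.1) := by
  intro L
  induction L with
  | nil => intro x; simp [Alt]
  | cons a t ih =>
    intro x
    match t with
    | [] => simp [Alt]
    | b :: s =>
      have h3 : (a :: b :: s) ++ [x] = a :: ((b :: s) ++ [x]) := by simp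
      rw [h3]
      show a.1 ≠ b.1 ∧ Alt ((b :: s) ++ [x]) ↔ _
      rw [ih x]
      have hgl : (a :: b :: s).getLast? = (b :: s).getLast? := by
        simp [List.getLast?_cons_cons]
      rw [hgl]
      show _ ↔ (a.1 ≠ b.1 ∧ Alt (b :: s)) ∧ _
      tauto

theorem scanVal_nonneg (R : List (Int × Int)) : 0 ≤ scanVal R :=
  foldl_max_nonneg _ 0 le_rfl

theorem addRun_nil (v : Int) :
    addRun [] v = [((if v = 1 ∨ v = -1 then v else 0), 1)] := rfl

theorem addRun_concat (R' : List (Int × Int)) (d len v : Int) :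
    addRun (R' ++ [(d, len)]) v =
      if d = (if v = 1 ∨ v = -1 then v else 0) then R' ++ [(d, len + 1)]
      else (R' ++ [(d, len)]) ++ [((if v = 1 ∨ v = -1 then v else 0), 1)] := by
  simp only [addRun, List.getLast?_concat, List.dropLast_concat]

theorem stClassOf_concat (R' : List (Int × Int)) (d l : Int) :
    stClassOf (R' ++ [(d, l)]) =
      if d = 0 then (match R'.getLast? with | none => 0 | some (c2, _) => c2) else d := by
  simp [stClassOf, List.dropLast_concat]

theorem gapOf_concat (R' : List (Int × Int)) (d l : Int) :
    gapOf (R' ++ [(d, l)]) = if d = 0 then l else 0 := by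
  simp [gapOf]

theorem scanVal_concat (R' : List (Int × Int)) (x : Int × Int) :
    scanVal (R' ++ [x]) = (tailC R' x).foldl max (scanVal R') := by
  simp [scanVal, contribs_concat, List.foldl_append]

-- MAIN INVARIANT: running B's run builder over l from runs R and scanning
-- equals running A's reference recursion from the state R encodes.
theorem main_inv : ∀ (l : List Int) (R : List (Int × Int)), Alt R → ClsOK R →
    scanVal (l.foldl addRun R) = go (stClassOf R) (gapOf R) (scanVal R) l := by
  intro l
  induction l with
  | nil => intro R _ _; rfl
  | cons v t ih =>
    intro R hAlt hCls
    rw [List.foldl_cons]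
    rcases List.eq_nil_or_concat R with rfl | ⟨R', x, rfl⟩
    · -- first element: runs = [(c, 1)]
      have hA' : Alt (addRun [] v) := by rw [addRun_nil]; trivial
      have hC' : ClsOK (addRun [] v) := by
        intro p hp
        rw [addRun_nil, List.mem_singleton] at hp
        subst hp
        by_cases h1 : v = 1 <;> by_cases h2 : v = -1 <;> simp [h1, h2]
      rw [ih _ hA' hC']
      by_cases h1 : v = 1
      · subst h1; simp [addRun_nil, go, stClassOf, gapOf, scanVal, contribs]
      · by_cases h2 : v = -1
        · subst h2; simp [addRun_nil, go, stClassOf, gapOf, scanVal, contribs]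
        · simp [addRun_nil, go, h1, h2, stClassOf, gapOf, scanVal, contribs]
    · obtain ⟨d, len⟩ := x
      simp only [List.concat_eq_append] at hAlt hCls ⊢
      obtain ⟨hAR', hlast⟩ := (alt_concat R' (d, len)).mp hAlt
      have hdcls : d = 1 ∨ d = -1 ∨ d = 0 := hCls (d, len) (by simp)
      have hres : (0 : Int) ≤ scanVal (R' ++ [(d, len)]) := scanVal_nonneg _
      by_cases hdc : d = (if v = 1 ∨ v = -1 then v else 0)
      · -- merge into the last run
        have hmerge : addRun (R' ++ [(d, len)]) v = R' ++ [(d, len + 1)] := by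
          rw [addRun_concat, if_pos hdc]
        have hA' : Alt (R' ++ [(d, len + 1)]) :=
          (alt_concat _ _).mpr ⟨hAR', hlast⟩
        have hC' : ClsOK (R' ++ [(d, len + 1)]) := by
          intro p hp
          rcases List.mem_append.mp hp with h | h
          · exact hCls p (List.mem_append_left _ h)
          · rw [List.mem_singleton] at h; subst h; exact hdcls
        rw [hmerge, ih _ hA' hC']
        have hsv : scanVal (R' ++ [(d, len + 1)]) = scanVal (R' ++ [(d, len)]) := by
          rw [scanVal_concat, scanVal_concat, tailC_fst ((d, len + 1)) ((d, len)) rfl]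
        by_cases h1 : v = 1
        · subst h1
          simp only [show d = (1 : Int) from by simpa using hdc] at *
          simp only [go, stClassOf_concat, gapOf_concat, hsv]
          norm_num
        · by_cases h2 : v = -1
          · subst h2
            simp only [show d = (-1 : Int) from by simpa [h1] using hdc] at *
            simp only [go, stClassOf_concat, gapOf_concat, hsv]
            norm_num
          · have hd0 : d = 0 := by simpa [h1, h2] using hdc
            subst hd0
            simp only [go, if_neg h1, if_neg h2, stClassOf_concat, gapOf_concat, hsv]
            norm_num
      · -- start a new run
        have happ : addRun (R' ++ [(d, len)]) v
            = (R' ++ [(d, len)]) ++ [((if v = 1 ∨ v = -1 then v else 0), 1)] := by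
          rw [addRun_concat, if_neg hdc]
        have hA' : Alt ((R' ++ [(d, len)]) ++ [((if v = 1 ∨ v = -1 then v else 0), 1)]) := by
          refine (alt_concat _ _).mpr ⟨hAlt, ?_⟩
          intro p hp
          rw [List.getLast?_concat, Option.mem_some_iff] at hp
          subst hp
          exact hdc
        have hC' : ClsOK ((R' ++ [(d, len)]) ++ [((if v = 1 ∨ v = -1 then v else 0), 1)]) := by
          intro p hp
          rcases List.mem_append.mp hp with h | h
          · exact hCls p h
          · rw [List.mem_singleton] at h; subst h
            by_cases h1 : v = 1 <;> by_cases h2 : v = -1 <;> simp [h1, h2]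
        rw [happ, ih _ hA' hC']
        by_cases h1 : v = 1
        · subst h1
          have hd1 : d ≠ 1 := by simpa using hdc
          simp only [if_pos (Or.inl rfl)] at *
          rw [scanVal_concat] at hres
          simp only [go, stClassOf_concat, gapOf_concat, scanVal_concat, tailC_concat,
            List.getLast?_concat]
          norm_num
          rcases hE : R'.getLast? with _ | ⟨e, elen⟩
          · -- no run before the last one
            simp only [stClassOf_concat, hE]
            rcases hdcls with h | h | h
            · exact absurd h hd1
            · subst h; simp [max_eq_left hres]
            · simp [h]
          · have he : e ≠ d := by
              have := hlast (e, elen) (by rw [hE]; rfl)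
              simpa using this
            simp only [stClassOf_concat, hE]
            rcases hdcls with h | h | h
            · exact absurd h hd1
            · -- d = -1 : adjacent forts, gap 0; the previous run e ≠ -1 contributes nothing
              have he1 : e ≠ -1 := by rw [h] at he; exact he
              subst h; simp [he1, max_eq_left hres]
            · -- d = 0 : zero run of length len between e-run and the new 1-run
              by_cases he1 : e = -1
              · simp [h, he1]
              · simp [h, he1]
        · by_cases h2 : v = -1
          · subst h2
            have hd1 : d ≠ -1 := by simpa [h1] using hdc
            simp only [show ((if (-1 : Int) = 1 ∨ (-1 : Int) = -1 then (-1 : Int) else 0)) = -1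
              from by norm_num] at *
            rw [scanVal_concat] at hres
            simp only [go, stClassOf_concat, gapOf_concat, scanVal_concat, tailC_concat,
              List.getLast?_concat]
            norm_num
            rcases hE : R'.getLast? with _ | ⟨e, elen⟩
            · simp only [stClassOf_concat, hE]
              rcases hdcls with h | h | h
              · subst h; simp [max_eq_left hres]
              · exact absurd h hd1
              · simp [h]
            · have he : e ≠ d := by
                have := hlast (e, elen) (by rw [hE]; rfl)
                simpa using this
              simp only [stClassOf_concat, hE]
              rcases hdcls with h | h | h
              · have he1 : e ≠ 1 := by rw [h] at he; exact he
                subst h; simp [he1, max_eq_left hres]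
              · exact absurd h hd1
              · by_cases he1 : e = 1
                · simp [h, he1]
                · simp [h, he1]
          · have hd0 : d ≠ 0 := by simpa [h1, h2] using hdc
            simp only [show ((if v = 1 ∨ v = -1 then v else 0)) = 0
              from by simp [h1, h2]] at *
            simp only [go, if_neg h1, if_neg h2, stClassOf_concat, gapOf_concat,
              scanVal_concat, tailC_concat, List.getLast?_concat]
            simp [hd0]
            rcases R'.getLast? with _ | p <;> rfl

-- ===== VERDICT (by name: the statement is the Claim_ definition above) =====
theorem captureForts_spec : Claim_equal_captureForts := by
  intro forts _
  unfold Spec_captureForts captureForts captureForts_alt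
  rw [foldA_eq_go, go_zero_gap forts (0 - 0 - 1) 0 0, foldB_eq_contribs]
  exact (main_inv forts [] trivial (by intro p hp; simp at hp)).symm
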